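-- pv_equiv track=rewrite | github.com/skyecrocker/Computational_Epistemology | epistemic_landscapes/Social_Network.py | makeTwoCliquesGraph
-- ===== SOURCE A (Python) =====
-- def makeTwoCliquesGraph(numAgents):
--     """
--     Generate a two cliques graph.
--
--     Args:
--         numAgents (int): Number of agents.
--
--     Returns:
--         list of lists: Adjacency matrix representing the two cliques graph.
--     """
--     m = []
--
--     for i in range(numAgents):
--         m.append([])
--         for j in range(numAgents):
--             if (i < numAgents / 2 and j < numAgents / 2) or (i >= numAgents / 2 and j >= numAgents / 2):
--                 m[i].append(1)
--             else:
--                 m[i].append(0)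
--
--     m[0][numAgents - 1] = 1
--     m[numAgents - 1][0] = 1
--
--     return m
-- ===== SOURCE B (Python) =====
-- def makeTwoCliquesGraph(numAgents):
--     """Two-cliques adjacency matrix built from prefabricated block rows
--     instead of a per-cell nested condition loop."""
--     k = (numAgents + 1) // 2          # size of the first clique
--     top = [1] * k + [0] * (numAgents - k)
--     bot = [0] * k + [1] * (numAgents - k)
--     m = [top[:] for _ in range(k)] + [bot[:] for _ in range(numAgents - k)]
--     m[0][numAgents - 1] = 1
--     m[numAgents - 1][0] = 1
--     return m
-- ===== Notes on version B (the rewrite author's own statement) =====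
-- stated objective: simpler
-- what changed: B replaces the per-cell nested loop with a float comparison in each cell by building the two distinct block rows once with list repetition/concatenation and replicating them, then setting the two bridge cells.
-- outside the precondition, e.g. on makeTwoCliquesGraph(0): A raises IndexError, B raises IndexError
import Mathlib
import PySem

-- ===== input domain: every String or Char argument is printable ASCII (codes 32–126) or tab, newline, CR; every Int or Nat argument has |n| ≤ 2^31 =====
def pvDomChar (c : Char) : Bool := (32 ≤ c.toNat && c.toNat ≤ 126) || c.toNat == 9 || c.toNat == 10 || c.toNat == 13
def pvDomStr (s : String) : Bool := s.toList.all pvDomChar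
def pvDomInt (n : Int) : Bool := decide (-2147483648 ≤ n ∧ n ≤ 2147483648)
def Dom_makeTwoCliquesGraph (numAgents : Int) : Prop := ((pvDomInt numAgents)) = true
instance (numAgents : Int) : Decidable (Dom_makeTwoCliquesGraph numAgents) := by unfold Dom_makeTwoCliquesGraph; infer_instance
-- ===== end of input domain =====

-- B builds the two distinct block rows once and replicates them instead of recomputing a per-cell condition; objective: simpler.


-- ===== PORT A =====
-- shared helper: 'm[i][j] = v' for in-range nonnegative i, j (Pre_ guarantees the
-- indices used below are in range; Python raises IndexError otherwise)
def pvSetCell (m : List (List Int)) (i j : Nat) (v : Int) : List (List Int) :=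
  m.set i ((m.getD i []).set j v)

-- 'i < numAgents / 2' uses Python float division; it is exact for |numAgents| ≤ 2^31
-- and equivalent to 2*i < numAgents, which is how it is ported.
def makeTwoCliquesGraph (numAgents : Int) : List (List Int) :=
  let r := PySem.List.pyRange 0 numAgents 1
  let m := r.map (fun i =>
    r.map (fun j =>
      if (2*i < numAgents ∧ 2*j < numAgents) ∨ (2*i ≥ numAgents ∧ 2*j ≥ numAgents)
      then (1:Int) else 0))
  let m := pvSetCell m 0 (numAgents - 1).toNat 1
  pvSetCell m (numAgents - 1).toNat 0 1

-- ===== PORT B =====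
def makeTwoCliquesGraph_alt (numAgents : Int) : List (List Int) :=
  let k := PySem.Int.floordiv (numAgents + 1) 2
  let top := List.replicate k.toNat (1:Int) ++ List.replicate (numAgents - k).toNat 0
  let bot := List.replicate k.toNat (0:Int) ++ List.replicate (numAgents - k).toNat 1
  let m := List.replicate k.toNat top ++ List.replicate (numAgents - k).toNat bot
  let m := pvSetCell m 0 (numAgents - 1).toNat 1
  pvSetCell m (numAgents - 1).toNat 0 1

-- ===== PRECONDITION & SPEC =====
-- Pre_ excludes numAgents ≤ 0, on which A (and B) raise IndexError at 'm[0][numAgents-1] = 1'.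
def Pre_makeTwoCliquesGraph (numAgents : Int) : Prop := 1 ≤ numAgents
instance (numAgents : Int) : Decidable (Pre_makeTwoCliquesGraph numAgents) := by unfold Pre_makeTwoCliquesGraph; infer_instance
def pvWitness_makeTwoCliquesGraph : Int := 5

def Spec_makeTwoCliquesGraph (numAgents : Int) (out : List (List Int)) : Prop := out = makeTwoCliquesGraph_alt numAgents
instance (numAgents : Int) (out : List (List Int)) : Decidable (Spec_makeTwoCliquesGraph numAgents out) := by unfold Spec_makeTwoCliquesGraph; infer_instance

-- ===== CLAIM (what is proved, stated in full; the proofs are below) =====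
def Claim_equal_makeTwoCliquesGraph : Prop := ∀ (numAgents : Int), Dom_makeTwoCliquesGraph numAgents → Pre_makeTwoCliquesGraph numAgents → Spec_makeTwoCliquesGraph numAgents (makeTwoCliquesGraph numAgents)

-- ===== LEMMAS AND PROOFS =====

-- A map over range whose value is block-constant is two replicates.
lemma pvMapRangeBlocks {α : Type} (N K : Nat) (hK : K ≤ N) (f : Nat → α) (a b : α)
    (hf : ∀ j, j < N → f j = if j < K then a else b) :
    (List.range N).map f = List.replicate K a ++ List.replicate (N - K) b := by
  apply List.ext_getElem
  · simp; omega
  · intro i h1 h2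
    simp only [List.getElem_map, List.getElem_range, List.getElem_append,
      List.length_replicate, List.getElem_replicate]
    rw [hf i (by simpa using h1)]
    split_ifs <;> simp_all

theorem pv_core_eq (n : Int) (hn : 1 ≤ n) :
    (PySem.List.pyRange 0 n 1).map (fun i =>
      (PySem.List.pyRange 0 n 1).map (fun j =>
        if (2*i < n ∧ 2*j < n) ∨ (2*i ≥ n ∧ 2*j ≥ n) then (1:Int) else 0)) =
    (let k := PySem.Int.floordiv (n + 1) 2
     let top := List.replicate k.toNat (1:Int) ++ List.replicate (n - k).toNat 0
     let bot := List.replicate k.toNat (0:Int) ++ List.replicate (n - k).toNat 1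
     List.replicate k.toNat top ++ List.replicate (n - k).toNat bot) := by
  have hfd : PySem.Int.floordiv (n + 1) 2 = (n + 1) / 2 :=
    PySem.Int.floordiv_eq_ediv_of_pos (by omega)
  simp only [hfd]
  set K := ((n + 1) / 2).toNat with hKdef
  set N := n.toNat with hNdef
  have hKN : K ≤ N := by omega
  have hNK : (n - (n + 1) / 2).toNat = N - K := by omega
  have hiK : ∀ i : Nat, (2 * (i : Int) < n ↔ i < K) := by intro i; omega
  have hr : PySem.List.pyRange 0 n 1 = (List.range N).map (fun k : Nat => (k:Int)) := by
    rw [PySem.List.pyRange_one]; simp [hNdef]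
  rw [hr]
  simp only [List.map_map]
  rw [hNK]
  apply pvMapRangeBlocks N K hKN _ _ _
  intro i hi
  by_cases hcase : i < K
  · rw [if_pos hcase]
    apply pvMapRangeBlocks N K hKN
    intro j hj
    have h1 := hiK i
    have h2 := hiK j
    simp only [Function.comp_apply]
    split_ifs <;> omega
  · rw [if_neg hcase]
    apply pvMapRangeBlocks N K hKN
    intro j hj
    have h1 := hiK i
    have h2 := hiK j
    simp only [Function.comp_apply]
    split_ifs <;> omega

-- ===== VERDICT (by name: the statement is the Claim_ definition above) =====
theorem makeTwoCliquesGraph_spec : Claim_equal_makeTwoCliquesGraph := by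
  intro n hdom hpre
  unfold Spec_makeTwoCliquesGraph makeTwoCliquesGraph makeTwoCliquesGraph_alt
  dsimp only
  rw [pv_core_eq n hpre]
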